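-- pv_equiv track=rewrite | github.com/SebastianMeisel/org-parser | org_parser.py | parse_html_attr_args
-- ===== SOURCE A (Python) =====
-- def parse_html_attr_args(arg_string: str) -> dict[str, str]:
--     """
--     Parse an Org #+ATTR_HTML: argument string into a dict.
--
--     Example:
--         ':width 50% :class big img-rounded'
--     ->  {'width': '50%', 'class': 'big img-rounded'}
--
--     Very permissive: values may contain spaces until the next ':key'.
--     """
--     tokens = arg_string.strip().split()
--     if not tokens:
--         return {}
--
--     attrs: dict[str, str] = {}
--     i = 0
--     while i < len(tokens):
--         token = tokens[i]
--         if token.startswith(":"):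
--             key = token[1:]
--             i += 1
--             values: list[str] = []
--             while i < len(tokens) and not tokens[i].startswith(":"):
--                 values.append(tokens[i])
--                 i += 1
--             attrs[key] = " ".join(values) if values else "true"
--         else:
--             # stray token: ignore
--             i += 1
--     return attrs
-- ===== SOURCE B (Python) =====
-- def parse_html_attr_args(arg_string: str) -> dict[str, str]:
--     """Index-based grouping: find key positions once, then pair each key
--     with the slice of tokens up to the next key position."""
--     tokens = arg_string.strip().split()
--     keyed = [(i, t[1:]) for i, t in enumerate(tokens) if t.startswith(":")]
--     bounds = [i for i, _ in keyed][1:] + [len(tokens)]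
--     return {k: " ".join(tokens[i + 1:j]) or "true"
--             for (i, k), j in zip(keyed, bounds)}
-- ===== Notes on version B (the rewrite author's own statement) =====
-- stated objective: alternative
-- what changed: Replaces A's nested while-loops with stateful index bookkeeping by a non-sequential index computation: enumerate-filter finds all key positions at once, zip pairs each key with the next key position, and each value is a direct slice tokens[i+1:j].
import Mathlib
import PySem

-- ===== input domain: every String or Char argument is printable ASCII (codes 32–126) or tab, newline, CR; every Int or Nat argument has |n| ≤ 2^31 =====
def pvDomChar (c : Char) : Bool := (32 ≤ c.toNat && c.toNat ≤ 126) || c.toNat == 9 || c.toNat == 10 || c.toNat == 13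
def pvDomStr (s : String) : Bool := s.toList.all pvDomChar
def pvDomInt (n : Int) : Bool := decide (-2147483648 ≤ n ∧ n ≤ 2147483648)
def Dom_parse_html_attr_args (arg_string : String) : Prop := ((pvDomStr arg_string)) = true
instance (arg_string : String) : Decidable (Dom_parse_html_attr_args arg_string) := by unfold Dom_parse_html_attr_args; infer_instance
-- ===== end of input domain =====

-- B replaces A's nested while-loops (sequential state machine) by a non-sequential
-- index computation: all key positions are found at once and each value is a direct
-- slice between consecutive key positions (objective: alternative, same cost).

-- ===== PORT A =====
-- A's outer while over tokens; the inner value-collecting while is the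
-- takeWhile/dropWhile pair over the same suffix, advancing i past the values.
def parse_html_attr_args_loopA (tokens : List String) (attrs : PySem.Dict String String) :
    PySem.Dict String String :=
  match tokens with
  | [] => attrs
  | token :: rest =>
    if PySem.Str.startswith token ":" then
      let key := PySem.Str.slice token (some 1) none
      let values := rest.takeWhile (fun t => !PySem.Str.startswith t ":")
      let rest' := rest.dropWhile (fun t => !PySem.Str.startswith t ":")
      parse_html_attr_args_loopA rest'
        (attrs.insert key (if values.isEmpty then "true" else PySem.Str.join " " values))
    else parse_html_attr_args_loopA rest attrs
termination_by tokens.length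
decreasing_by
  · exact Nat.lt_succ_of_le (List.length_dropWhile_le _ _)
  · simp

def parse_html_attr_args (arg_string : String) : List (String × String) :=
  let tokens := PySem.Str.split₀ (PySem.Str.strip arg_string)
  if tokens.isEmpty then []
  else (parse_html_attr_args_loopA tokens PySem.Dict.empty).items

-- ===== PORT B =====
def parse_html_attr_args_alt (arg_string : String) : List (String × String) :=
  let tokens := PySem.Str.split₀ (PySem.Str.strip arg_string)
  let keyed := ((PySem.List.enumerate tokens 0).filter
      (fun p => PySem.Str.startswith p.2 ":")).map
      (fun p => (p.1, PySem.Str.slice p.2 (some 1) none))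
  let bounds := (keyed.map (fun p => p.1)).drop 1 ++ [(tokens.length : Int)]
  let pairs := (keyed.zip bounds).map (fun pj =>
    (pj.1.2,
      let v := PySem.Str.join " " (PySem.List.slice tokens (some (pj.1.1 + 1)) (some pj.2))
      if v = "" then "true" else v))
  (pairs.foldl (fun d kv => d.insert kv.1 kv.2) PySem.Dict.empty).items

-- ===== PRECONDITION & SPEC =====
def Spec_parse_html_attr_args (arg_string : String) (out : List (String × String)) : Prop := out = parse_html_attr_args_alt arg_string
instance (arg_string : String) (out : List (String × String)) : Decidable (Spec_parse_html_attr_args arg_string out) := by unfold Spec_parse_html_attr_args; infer_instance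

-- ===== CLAIM (what is proved, stated in full; the proofs are below) =====
def Claim_equal_parse_html_attr_args : Prop := ∀ (arg_string : String), Dom_parse_html_attr_args arg_string → Spec_parse_html_attr_args arg_string (parse_html_attr_args arg_string)

-- ===== LEMMAS AND PROOFS =====

-- the key/value pairs A's loop inserts, as a list (common reference point)
def pvPairsOfA : List String → List (String × String)
  | [] => []
  | t :: ts =>
    if PySem.Str.startswith t ":" then
      (PySem.Str.slice t (some 1) none,
        if (ts.takeWhile (fun x => !PySem.Str.startswith x ":")).isEmpty then "true"
        else PySem.Str.join " " (ts.takeWhile (fun x => !PySem.Str.startswith x ":"))) :: pvPairsOfA ts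
    else pvPairsOfA ts

-- B's keyed list, parameterised by the start offset s (absolute indices)
def pvKeyedOf (full : List String) (s : Nat) : List (Int × String) :=
  ((PySem.List.enumerate (full.drop s) (s : Int)).filter
      (fun p => PySem.Str.startswith p.2 ":")).map
      (fun p => (p.1, PySem.Str.slice p.2 (some 1) none))

-- B's pair list from offset s
def pvPairsFromB (full : List String) (s : Nat) : List (String × String) :=
  ((pvKeyedOf full s).zip
      (((pvKeyedOf full s).map (fun p => p.1)).drop 1 ++ [(full.length : Int)])).map
    (fun pj =>
      (pj.1.2,
        let v := PySem.Str.join " " (PySem.List.slice full (some (pj.1.1 + 1)) (some pj.2))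
        if v = "" then "true" else v))


-- String equality via toList (PySem works on toList throughout)
theorem pv_str_ext (s t : String) (h : s.toList = t.toList) : s = t := by
  calc s = String.ofList s.toList := by simp
    _ = String.ofList t.toList := by rw [h]
    _ = t := by simp

theorem pv_eq_empty_iff (t : String) : t = "" ↔ t.toList = [] := by
  constructor
  · intro ht; simp [ht]
  · intro ht; exact pv_str_ext _ _ (by simpa using ht)


-- tokens produced by split() are never empty strings
theorem pv_split0_go_ne_nil (s : List Char) :
    ∀ (cur : List Char) (acc : List (List Char)), (∀ x ∈ acc, x ≠ []) →
      ∀ x ∈ PySem.Chars.split₀.go s cur acc, x ≠ [] := by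
  induction s with
  | nil =>
    intro cur acc hacc x hx
    rw [PySem.Chars.split₀.go.eq_def] at hx
    by_cases hc : cur.isEmpty
    · simp [hc] at hx
      exact hacc x hx
    · simp [hc] at hx
      rcases hx with hx | hx <;>
        first
        | exact hacc x hx
        | (subst hx; simpa [List.isEmpty_iff] using hc)
  | cons c rest ih =>
    intro cur acc hacc x hx
    rw [PySem.Chars.split₀.go.eq_def] at hx
    by_cases hsp : PySem.Chars.isspace c
    · by_cases hc : cur.isEmpty
      · simp [hsp, hc] at hx
        exact ih [] acc hacc x hx
      · simp [hsp, hc] at hx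
        refine ih [] (cur.reverse :: acc) ?_ x hx
        intro y hy
        rcases List.mem_cons.mp hy with hy' | hy'
        · subst hy'; simpa [List.isEmpty_iff] using hc
        · exact hacc y hy'
    · simp [hsp] at hx
      exact ih (c :: cur) acc hacc x hx

theorem pv_split0_ne_empty (s : String) : ∀ x ∈ PySem.Str.split₀ s, x ≠ "" := by
  intro x hx
  have h := PySem.Str.split₀_map_toList s
  have hxl : x.toList ∈ PySem.Chars.split₀ s.toList := by
    rw [← h]; exact List.mem_map_of_mem hx
  have hne : x.toList ≠ [] := by
    refine pv_split0_go_ne_nil s.toList [] [] (by simp) x.toList ?_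
    simpa [PySem.Chars.split₀] using hxl
  intro hcontra
  exact hne (by simp [hcontra])

-- the "or 'true'" test coincides with the emptiness test on nonempty tokens
theorem pv_val_eq (vs : List String) (h : ∀ x ∈ vs, x ≠ "") :
    (if PySem.Str.join " " vs = "" then "true" else PySem.Str.join " " vs) =
      (if vs.isEmpty then "true" else PySem.Str.join " " vs) := by
  match vs with
  | [] =>
    have : PySem.Str.join " " ([] : List String) = "" := by
      apply pv_str_ext
      simp [PySem.Str.toList_join, PySem.Chars.join_nil]
    simp [this]
  | [v] =>
    have hv : v ≠ "" := h v (by simp)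
    have hj : PySem.Str.join " " [v] = v := by
      apply pv_str_ext
      simp [PySem.Str.toList_join, PySem.Chars.join_singleton]
    simp [hj, hv]
  | v :: w :: rest =>
    have hne : PySem.Str.join " " (v :: w :: rest) ≠ "" := by
      rw [ne_eq, pv_eq_empty_iff, PySem.Str.toList_join, List.map_cons, List.map_cons,
        PySem.Chars.join_cons_cons]
      simp
    simp [hne]

-- head of the absolute key-index list = offset + length of the keyless prefix
theorem pv_headD_keyIdx (rest : List String) : ∀ (i : Int),
    ((((PySem.List.enumerate rest i).filter
        (fun p => PySem.Str.startswith p.2 ":")).map (fun p => p.1)).headD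
          (i + rest.length)) =
      i + (rest.takeWhile (fun x => !PySem.Str.startswith x ":")).length := by
  induction rest with
  | nil => intro i; simp [PySem.List.enumerate]
  | cons t ts ih =>
    intro i
    rw [PySem.List.enumerate_cons]
    by_cases hk : PySem.Str.startswith t ":"
    · rw [List.filter_cons_of_pos (by simpa using hk)]
      rw [List.takeWhile_cons_of_neg (by simpa using hk)]
      simp
    · rw [List.filter_cons_of_neg (by simpa using hk)]
      rw [List.takeWhile_cons_of_pos (by simpa using hk)]
      have harith : i + ((t :: ts).length : Int) = (i + 1) + (ts.length : Int) := by
        simp; ring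
      rw [harith, ih (i + 1)]
      simp
      ring

-- take as long as the takeWhile prefix recovers the takeWhile prefix
theorem pv_take_takeWhile {α : Type} (p : α → Bool) (l : List α) :
    l.take ((l.takeWhile p).length) = l.takeWhile p := by
  induction l with
  | nil => simp
  | cons x xs ih =>
    by_cases hx : p x
    · rw [List.takeWhile_cons_of_pos hx]
      simp [ih]
    · rw [List.takeWhile_cons_of_neg (by simp [hx])]
      simp

-- skipping leading non-key tokens does not change the pair list
theorem pv_pairsOfA_dropWhile (ts : List String) :
    pvPairsOfA (ts.dropWhile (fun x => !PySem.Str.startswith x ":")) = pvPairsOfA ts := by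
  induction ts with
  | nil => simp
  | cons t ts ih =>
    by_cases hk : PySem.Str.startswith t ":"
    · rw [List.dropWhile_cons_of_neg (by simpa using hk)]
    · rw [List.dropWhile_cons_of_pos (by simpa using hk)]
      rw [ih]
      conv_rhs => rw [pvPairsOfA]
      rw [if_neg (by simpa using hk)]

-- A's loop is the fold of its pair list
theorem pv_loopA_eq_fold (n : Nat) : ∀ (ts : List String), ts.length ≤ n →
    ∀ (d : PySem.Dict String String),
      parse_html_attr_args_loopA ts d =
        (pvPairsOfA ts).foldl (fun d kv => d.insert kv.1 kv.2) d := by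
  induction n with
  | zero =>
    intro ts hts d
    have : ts = [] := List.eq_nil_of_length_eq_zero (Nat.le_zero.mp hts)
    subst this
    rw [parse_html_attr_args_loopA, pvPairsOfA]
    simp
  | succ n ih =>
    intro ts hts d
    match ts with
    | [] =>
      rw [parse_html_attr_args_loopA, pvPairsOfA]
      simp
    | t :: rest =>
      have hlen : rest.length ≤ n := by simpa using hts
      by_cases hk : PySem.Str.startswith t ":"
      · rw [parse_html_attr_args_loopA, if_pos hk]
        rw [ih _ (Nat.le_trans (List.length_dropWhile_le _ _) hlen)]
        rw [pv_pairsOfA_dropWhile]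
        conv_rhs => rw [pvPairsOfA]
        rw [if_pos hk]
        rw [List.foldl_cons]
      · rw [parse_html_attr_args_loopA, if_neg hk]
        rw [ih _ hlen]
        conv_rhs => rw [pvPairsOfA]
        rw [if_neg hk]

-- the zip-with-successor-bounds list peels its head
theorem pv_zip_peel {α : Type} (a : Int × α) (K : List (Int × α)) (L : Int) :
    (a :: K).zip ((K.map (fun p => p.1)) ++ [L]) =
      (a, (K.map (fun p => p.1)).headD L) ::
        K.zip (((K.map (fun p => p.1)).drop 1) ++ [L]) := by
  match K with
  | [] => simp
  | b :: K' => simp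

-- map fst past the keyed map
theorem pv_keyed_map_fst (full : List String) (u : Nat) :
    (pvKeyedOf full u).map (fun p => p.1) =
      ((PySem.List.enumerate (full.drop u) (u : Int)).filter
        (fun p => PySem.Str.startswith p.2 ":")).map (fun p => p.1) := by
  unfold pvKeyedOf
  rw [List.map_map]
  rfl

-- B's pair list from offset s equals A's pair list of the corresponding suffix
theorem pv_pairsFromB_eq (rest : List String) : ∀ (s : Nat) (full : List String),
    full.drop s = rest → (∀ x ∈ full, x ≠ "") →
    pvPairsFromB full s = pvPairsOfA rest := by
  induction rest with
  | nil =>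
    intro s full hdrop _
    unfold pvPairsFromB pvKeyedOf
    rw [hdrop]
    simp [PySem.List.enumerate, pvPairsOfA]
  | cons t rest' ih =>
    intro s full hdrop hne
    have hdrop1 : full.drop (s + 1) = rest' := by
      have h1 := congrArg (List.drop 1) hdrop
      rw [List.drop_drop] at h1
      simpa using h1
    have hcast : (s : Int) + 1 = ((s + 1 : Nat) : Int) := by push_cast; ring
    have hkey : pvKeyedOf full s =
        (if PySem.Str.startswith t ":" then
          (((s : Int), PySem.Str.slice t (some 1) none) :: pvKeyedOf full (s + 1))
        else pvKeyedOf full (s + 1)) := by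
      unfold pvKeyedOf
      rw [hdrop, PySem.List.enumerate_cons, hcast, hdrop1]
      by_cases hk : PySem.Str.startswith t ":"
      · rw [if_pos hk, List.filter_cons_of_pos (by simpa using hk), List.map_cons]
      · rw [if_neg hk, List.filter_cons_of_neg (by simpa using hk)]
    have hLfull : (full.length : Int) = ((s + 1 : Nat) : Int) + (rest'.length : Int) := by
      have h2 : (full.drop (s + 1)).length = full.length - (s + 1) := List.length_drop
      rw [hdrop1] at h2
      have h3 : (full.drop s).length = full.length - s := List.length_drop
      rw [hdrop] at h3
      simp at h2 h3
      push_cast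
      omega
    by_cases hk : PySem.Str.startswith t ":"
    · -- key token: one pair is peeled off
      have hw : ∀ x ∈ rest'.takeWhile (fun x => !PySem.Str.startswith x ":"), x ≠ "" := by
        intro x hx
        refine hne x ?_
        have h1 : x ∈ rest' := (List.takeWhile_sublist _).subset hx
        rw [← hdrop1] at h1
        exact List.mem_of_mem_drop h1
      have hb0 : ((pvKeyedOf full (s + 1)).map (fun p => p.1)).headD (full.length : Int) =
          ((s + 1 : Nat) : Int) +
            ((rest'.takeWhile (fun x => !PySem.Str.startswith x ":")).length : Int) := by
        rw [pv_keyed_map_fst, hdrop1, hLfull]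
        exact pv_headD_keyIdx rest' _
      have hslice : PySem.List.slice full (some ((s : Int) + 1))
            (some (((s + 1 : Nat) : Int) +
              ((rest'.takeWhile (fun x => !PySem.Str.startswith x ":")).length : Int))) =
          rest'.takeWhile (fun x => !PySem.Str.startswith x ":") := by
        rw [hcast, PySem.List.slice_natCast_add, hdrop1, pv_take_takeWhile]
      unfold pvPairsFromB
      rw [hkey, if_pos hk, List.map_cons, List.drop_one, List.tail_cons, pv_zip_peel,
        List.map_cons]
      have htail :
          (((pvKeyedOf full (s + 1)).zip
              ((((pvKeyedOf full (s + 1)).map (fun p => p.1)).drop 1) ++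
                [(full.length : Int)])).map
            (fun pj =>
              (pj.1.2,
                let v := PySem.Str.join " "
                  (PySem.List.slice full (some (pj.1.1 + 1)) (some pj.2))
                if v = "" then "true" else v))) = pvPairsOfA rest' := by
        have := ih (s + 1) full hdrop1 hne
        unfold pvPairsFromB at this
        exact this
      rw [htail]
      conv_rhs => rw [pvPairsOfA]
      rw [if_pos hk]
      congr 1
      simp only [hb0, hslice]
      rw [pv_val_eq _ hw]
    · -- stray token: both sides skip it
      have hB : pvPairsFromB full s = pvPairsFromB full (s + 1) := by
        unfold pvPairsFromB
        rw [hkey, if_neg hk]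
      rw [hB, ih (s + 1) full hdrop1 hne]
      conv_rhs => rw [pvPairsOfA]
      rw [if_neg hk]

-- ===== VERDICT (by name: the statement is the Claim_ definition above) =====
theorem parse_html_attr_args_spec : Claim_equal_parse_html_attr_args := by
  unfold Claim_equal_parse_html_attr_args
  intro arg _
  unfold Spec_parse_html_attr_args
  have hne : ∀ x ∈ PySem.Str.split₀ (PySem.Str.strip arg), x ≠ "" :=
    pv_split0_ne_empty _
  have hB : parse_html_attr_args_alt arg =
      ((pvPairsFromB (PySem.Str.split₀ (PySem.Str.strip arg)) 0).foldl
        (fun d kv => d.insert kv.1 kv.2) PySem.Dict.empty).items := by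
    unfold parse_html_attr_args_alt pvPairsFromB pvKeyedOf
    simp only [List.drop_zero, Nat.cast_zero]
  have hpairs : pvPairsFromB (PySem.Str.split₀ (PySem.Str.strip arg)) 0 =
      pvPairsOfA (PySem.Str.split₀ (PySem.Str.strip arg)) :=
    pv_pairsFromB_eq _ 0 _ List.drop_zero hne
  rw [hB, hpairs]
  unfold parse_html_attr_args
  by_cases hts : (PySem.Str.split₀ (PySem.Str.strip arg)).isEmpty
  · rw [if_pos hts]
    rw [List.isEmpty_iff.mp hts]
    rfl
  · rw [if_neg hts]
    rw [pv_loopA_eq_fold (PySem.Str.split₀ (PySem.Str.strip arg)).length _ le_rfl]
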